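-- pv_equiv track=rewrite | github.com/aadelb/loom | src/loom/tools/ethereum_tools.py | _gen_recommendations
-- ===== SOURCE A (Python) =====
-- def _gen_recommendations(vulns: list[dict[str, str]]) -> list[str]:
--     """Generate security recommendations."""
--     recs = []
--     has_high = any(v.get("severity") == "high" for v in vulns)
--     has_medium = any(v.get("severity") == "medium" for v in vulns)
--
--     if has_high:
--         recs.append("Get professional security audit before mainnet deployment")
--     if any(v.get("type") == "potential_reentrancy" for v in vulns):
--         recs.append("Use Checks-Effects-Interactions pattern")
--     if any(v.get("type") == "tx_origin_usage" for v in vulns):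
--         recs.append("Replace tx.origin with msg.sender")
--     if any(v.get("type") == "unchecked_external_call" for v in vulns):
--         recs.append("Wrap external calls in require()")
--     if any(v.get("type") == "no_overflow_protection" for v in vulns):
--         recs.append("Upgrade to Solidity >= 0.8.0")
--     if has_medium or has_high:
--         recs.append("Consider formal verification")
--
--     return recs or ["No obvious vulnerabilities detected; still recommend review"]
-- ===== SOURCE B (Python) =====
-- # Table-driven rewrite: the six hard-coded if/append blocks become a data table of
-- # rules; one pass over vulns builds an index of observed (field, value) pairs, and
-- # the recommendations are produced by a single comprehension over the rule table.
-- _RULES = [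
--     ("severity", ("high",), "Get professional security audit before mainnet deployment"),
--     ("type", ("potential_reentrancy",), "Use Checks-Effects-Interactions pattern"),
--     ("type", ("tx_origin_usage",), "Replace tx.origin with msg.sender"),
--     ("type", ("unchecked_external_call",), "Wrap external calls in require()"),
--     ("type", ("no_overflow_protection",), "Upgrade to Solidity >= 0.8.0"),
--     ("severity", ("high", "medium"), "Consider formal verification"),
-- ]
--
--
-- def _gen_recommendations(vulns: list[dict[str, str]]) -> list[str]:
--     """Generate security recommendations (rule table + observed-pair index)."""
--     seen = {(k, v.get(k)) for v in vulns for k in ("severity", "type")}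
--     recs = [msg for field, triggers, msg in _RULES
--             if any((field, t) in seen for t in triggers)]
--     return recs or ["No obvious vulnerabilities detected; still recommend review"]
-- ===== Notes on version B (the rewrite author's own statement) =====
-- stated objective: alternative
-- what changed: B replaces the six hard-coded if/append blocks by a declarative rule table (field, trigger values, message): one pass over vulns builds an index set of observed (field, value) pairs, and the output is a single comprehension over the table, so adding a rule is a data edit rather than new control flow.
import Mathlib
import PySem

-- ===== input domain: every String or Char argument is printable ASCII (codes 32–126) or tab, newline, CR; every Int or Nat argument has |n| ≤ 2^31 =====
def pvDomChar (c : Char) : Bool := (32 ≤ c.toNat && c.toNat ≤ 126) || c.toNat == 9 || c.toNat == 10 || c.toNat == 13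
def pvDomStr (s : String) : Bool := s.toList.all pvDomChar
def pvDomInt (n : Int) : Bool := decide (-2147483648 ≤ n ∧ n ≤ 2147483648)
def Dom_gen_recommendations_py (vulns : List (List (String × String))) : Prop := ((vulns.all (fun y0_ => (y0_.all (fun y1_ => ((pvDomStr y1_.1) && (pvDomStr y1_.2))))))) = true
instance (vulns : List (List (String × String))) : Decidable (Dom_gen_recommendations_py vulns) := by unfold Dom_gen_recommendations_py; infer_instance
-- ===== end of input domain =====

-- B is table-driven: a declarative rule table plus one indexing pass over vulns collecting the
-- observed (field, value) pairs, then a single filter over the table — same values as A's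
-- six hard-coded if/append blocks, a different decomposition.

-- ===== PORT A =====
def gen_recommendations_py (vulns : List (List (String × String))) : List String :=
  let recs : List String := []
  let has_high := vulns.any (fun v => PySem.Dict.get? (PySem.Dict.mk v) "severity" == some "high")
  let has_medium := vulns.any (fun v => PySem.Dict.get? (PySem.Dict.mk v) "severity" == some "medium")
  let recs := if has_high then recs ++ ["Get professional security audit before mainnet deployment"] else recs
  let recs := if vulns.any (fun v => PySem.Dict.get? (PySem.Dict.mk v) "type" == some "potential_reentrancy") then recs ++ ["Use Checks-Effects-Interactions pattern"] else recs
  let recs := if vulns.any (fun v => PySem.Dict.get? (PySem.Dict.mk v) "type" == some "tx_origin_usage") then recs ++ ["Replace tx.origin with msg.sender"] else recs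
  let recs := if vulns.any (fun v => PySem.Dict.get? (PySem.Dict.mk v) "type" == some "unchecked_external_call") then recs ++ ["Wrap external calls in require()"] else recs
  let recs := if vulns.any (fun v => PySem.Dict.get? (PySem.Dict.mk v) "type" == some "no_overflow_protection") then recs ++ ["Upgrade to Solidity >= 0.8.0"] else recs
  let recs := if has_medium || has_high then recs ++ ["Consider formal verification"] else recs
  if recs.isEmpty then ["No obvious vulnerabilities detected; still recommend review"] else recs

-- ===== PORT B =====
-- the rule table of Source B: (field, trigger values, message)
def pvRules : List (String × List String × String) :=
  [ ("severity", ["high"], "Get professional security audit before mainnet deployment"),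
    ("type", ["potential_reentrancy"], "Use Checks-Effects-Interactions pattern"),
    ("type", ["tx_origin_usage"], "Replace tx.origin with msg.sender"),
    ("type", ["unchecked_external_call"], "Wrap external calls in require()"),
    ("type", ["no_overflow_protection"], "Upgrade to Solidity >= 0.8.0"),
    ("severity", ["high", "medium"], "Consider formal verification") ]

def gen_recommendations_py_alt (vulns : List (List (String × String))) : List String :=
  let seen : PySem.Set (String × Option String) :=
    PySem.Set.ofList (vulns.flatMap (fun v =>
      [("severity", PySem.Dict.get? (PySem.Dict.mk v) "severity"),
       ("type", PySem.Dict.get? (PySem.Dict.mk v) "type")]))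
  let recs := pvRules.filterMap (fun r =>
    if r.2.1.any (fun t => seen.contains (r.1, some t)) then some r.2.2 else none)
  if recs.isEmpty then ["No obvious vulnerabilities detected; still recommend review"] else recs

-- ===== PRECONDITION & SPEC =====
def Spec_gen_recommendations_py (vulns : List (List (String × String))) (out : List String) : Prop := out = gen_recommendations_py_alt vulns
instance (vulns : List (List (String × String))) (out : List String) : Decidable (Spec_gen_recommendations_py vulns out) := by unfold Spec_gen_recommendations_py; infer_instance

-- ===== CLAIM (what is proved, stated in full; the proofs are below) =====
def Claim_equal_gen_recommendations_py : Prop := ∀ (vulns : List (List (String × String))), Dom_gen_recommendations_py vulns → Spec_gen_recommendations_py vulns (gen_recommendations_py vulns)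

-- ===== LEMMAS AND PROOFS =====

-- membership of a (field, value) pair in B's index set = the any() scan A performs for that field
theorem seen_contains (vulns : List (List (String × String))) (k x : String)
    (hk : k = "severity" ∨ k = "type") :
    (PySem.Set.ofList (vulns.flatMap (fun v =>
      [(("severity" : String), PySem.Dict.get? (PySem.Dict.mk v) "severity"),
       ("type", PySem.Dict.get? (PySem.Dict.mk v) "type")]))).contains (k, some x)
    = vulns.any (fun v => PySem.Dict.get? (PySem.Dict.mk v) k == some x) := by
  rw [Bool.eq_iff_iff, PySem.Set.contains_iff, PySem.Set.mem_ofList]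
  have hts : ("type" : String) ≠ "severity" := by decide
  have hst : ("severity" : String) ≠ "type" := by decide
  rcases hk with rfl | rfl <;>
    (simp [List.mem_flatMap, List.any_eq_true, Prod.ext_iff, hts, hst]
     exact ⟨fun ⟨a, ha, he⟩ => ⟨a, ha, he.symm⟩, fun ⟨a, ha, he⟩ => ⟨a, ha, he.symm⟩⟩)

-- ===== VERDICT (by name: the statement is the Claim_ definition above) =====
theorem gen_recommendations_py_spec : Claim_equal_gen_recommendations_py := by
  intro vulns _
  unfold Spec_gen_recommendations_py gen_recommendations_py gen_recommendations_py_alt pvRules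
  simp only [List.filterMap_cons, List.filterMap_nil, List.any_cons, List.any_nil,
    Bool.or_false, seen_contains vulns _ _ (Or.inl rfl), seen_contains vulns _ _ (Or.inr rfl)]
  cases vulns.any (fun v => PySem.Dict.get? (PySem.Dict.mk v) "severity" == some "high") <;>
  cases vulns.any (fun v => PySem.Dict.get? (PySem.Dict.mk v) "severity" == some "medium") <;>
  cases vulns.any (fun v => PySem.Dict.get? (PySem.Dict.mk v) "type" == some "potential_reentrancy") <;>
  cases vulns.any (fun v => PySem.Dict.get? (PySem.Dict.mk v) "type" == some "tx_origin_usage") <;>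
  cases vulns.any (fun v => PySem.Dict.get? (PySem.Dict.mk v) "type" == some "unchecked_external_call") <;>
  cases vulns.any (fun v => PySem.Dict.get? (PySem.Dict.mk v) "type" == some "no_overflow_protection") <;>
  simp
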